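-- pv_equiv track=rewrite | github.com/kathiir/algorithms-for-strings | 3-kmp/borders.py | prefix_border_array_mod
-- ===== SOURCE A (Python) =====
-- def prefix_border_array_mod(string, bp):
--     bpm = [0] * len(bp)
--     bpm[0] = 0
--     n = len(string)
--     bpm[n - 1] = bp[n - 1]
--     for i in range(1, n - 1):
--         if bp[i] and (string[bp[i]] == string[i + 1]):
--             bpm[i] = bpm[bp[i] - 1]
--         else:
--             bpm[i] = bp[i]
--     return bpm
-- ===== SOURCE B (Python) =====
-- def prefix_border_array_mod(string, bp):
--     n = len(string)
--     res = [0] * len(bp)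
--     res[n - 1] = bp[n - 1]
--     for i in range(1, n - 1):
--         j = i
--         while bp[j] and string[bp[j]] == string[j + 1]:
--             j = bp[j] - 1
--         res[i] = bp[j]
--     return res
-- ===== Notes on version B (the rewrite author's own statement) =====
-- stated objective: alternative
-- what changed: Replaces the in-place DP memo table (bpm[i] read back from bpm[bp[i]-1]) by a per-position border-chain chase (j = bp[j]-1 while the extension condition holds), so no previously computed entry is ever read; …
-- outside the precondition, e.g. on prefix_border_array_mod('aab', [0, 2, 0]): A returns [0, 0, 0], B does not finish within the time limit; on prefix_border_array_mod('aaab', [3, 1, 0, 0]): A returns [0, 0, 0, 0], B returns [0, 3, 0, 0]; on prefix_border_array_mod('aba', [0, -1, 0]): A returns [0, 0, 0], B does not finish within the time limit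
import Mathlib
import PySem

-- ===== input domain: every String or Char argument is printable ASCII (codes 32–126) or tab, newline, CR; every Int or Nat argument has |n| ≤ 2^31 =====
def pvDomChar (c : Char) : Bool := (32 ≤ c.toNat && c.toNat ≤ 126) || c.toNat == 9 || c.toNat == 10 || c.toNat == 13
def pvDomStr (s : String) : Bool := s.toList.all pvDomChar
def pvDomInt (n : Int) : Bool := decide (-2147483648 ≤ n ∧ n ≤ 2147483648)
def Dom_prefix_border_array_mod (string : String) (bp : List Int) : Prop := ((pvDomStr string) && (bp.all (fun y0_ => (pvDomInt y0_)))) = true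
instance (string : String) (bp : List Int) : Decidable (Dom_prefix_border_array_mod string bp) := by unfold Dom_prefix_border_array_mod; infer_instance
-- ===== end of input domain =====

-- B replaces A's in-place memo-table DP by a per-position border-chain chase (no table entry is ever read back); equivalence proved on border-array-shaped inputs (Pre_).


-- ===== PORT A =====
def prefix_border_array_mod (string : String) (bp : List Int) : List Int :=
  let bpm0 : List Int := List.replicate bp.length 0   -- bpm = [0] * len(bp)
  let bpm1 := PySem.List.pySetD bpm0 0 0              -- bpm[0] = 0
  let n : Int := PySem.Str.len string
  let bpm2 := PySem.List.pySetD bpm1 (n - 1) (PySem.List.pyGetD bp (n - 1) 0)  -- bpm[n-1] = bp[n-1]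
  (PySem.List.pyRange 1 (n - 1) 1).foldl
    (fun bpm i =>
      if PySem.List.pyGetD bp i 0 != 0 &&
         (PySem.Str.pyGet? string (PySem.List.pyGetD bp i 0) == PySem.Str.pyGet? string (i + 1)) then
        PySem.List.pySetD bpm i (PySem.List.pyGetD bpm (PySem.List.pyGetD bp i 0 - 1) 0)
      else
        PySem.List.pySetD bpm i (PySem.List.pyGetD bp i 0))
    bpm2

-- ===== PORT B =====
-- Source B's 'while bp[j] and string[bp[j]] == string[j + 1]: j = bp[j] - 1' as fuel recursion;
-- the fuel is only a totality guard (under Pre_ the chase strictly decreases, so fuel i+1 never runs out)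
def pvChase (string : String) (bp : List Int) : Nat → Int → Int
  | 0, j => j
  | f + 1, j =>
    if PySem.List.pyGetD bp j 0 != 0 &&
       (PySem.Str.pyGet? string (PySem.List.pyGetD bp j 0) == PySem.Str.pyGet? string (j + 1)) then
      pvChase string bp f (PySem.List.pyGetD bp j 0 - 1)
    else j

def prefix_border_array_mod_alt (string : String) (bp : List Int) : List Int :=
  let n : Int := PySem.Str.len string
  let res0 := PySem.List.pySetD (List.replicate bp.length 0) (n - 1) (PySem.List.pyGetD bp (n - 1) 0)  -- res = [0]*len(bp); res[n-1] = bp[n-1]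
  (PySem.List.pyRange 1 (n - 1) 1).foldl
    (fun res i => PySem.List.pySetD res i (PySem.List.pyGetD bp (pvChase string bp (i.toNat + 1) i) 0))
    res0

-- ===== PRECONDITION & SPEC =====
-- Pre_ restricts to the task's natural domain — border-array-shaped inputs (len(bp) ≥ len(string) ≥ 1,
-- every link the loop uses in range and neither a negative nor a forward-pointing matching link, and
-- index 0 reachable along a chain only when bp[0] = 0): outside it A raises IndexError, or returns a
-- value produced by negative-index wraparound or by reading a forced-zero / not-yet-computed table
-- cell, where the natural chase diverges or returns the chain's endpoint instead.
def Pre_prefix_border_array_mod (string : String) (bp : List Int) : Prop :=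
  1 ≤ bp.length ∧ string.toList.length ≤ bp.length ∧
  (∀ i ∈ List.range string.toList.length, 1 ≤ i → i ≤ string.toList.length - 2 →
    (bp.getD i 0 = 0 ∨
      (-(string.toList.length : Int) ≤ bp.getD i 0 ∧ bp.getD i 0 < (string.toList.length : Int) ∧
        (PySem.Str.pyGet? string (bp.getD i 0) ≠ PySem.Str.pyGet? string ((i : Int) + 1) ∨
          (1 ≤ bp.getD i 0 ∧ bp.getD i 0 ≤ (i : Int)))))) ∧
  (bp.getD 0 0 = 0 ∨
    ∀ i ∈ List.range string.toList.length, 1 ≤ i → i ≤ string.toList.length - 2 →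
      ¬(bp.getD i 0 = 1 ∧ PySem.Str.pyGet? string 1 = PySem.Str.pyGet? string ((i : Int) + 1)))
instance (string : String) (bp : List Int) : Decidable (Pre_prefix_border_array_mod string bp) := by
  unfold Pre_prefix_border_array_mod; infer_instance

def pvWitness_prefix_border_array_mod : String × List Int := ("abab", [0, 0, 1, 2])

def Spec_prefix_border_array_mod (string : String) (bp : List Int) (out : List Int) : Prop := out = prefix_border_array_mod_alt string bp
instance (string : String) (bp : List Int) (out : List Int) : Decidable (Spec_prefix_border_array_mod string bp out) := by unfold Spec_prefix_border_array_mod; infer_instance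

-- ===== CLAIM (what is proved, stated in full; the proofs are below) =====
def Claim_equal_prefix_border_array_mod : Prop := ∀ (string : String) (bp : List Int), Dom_prefix_border_array_mod string bp → Pre_prefix_border_array_mod string bp → Spec_prefix_border_array_mod string bp (prefix_border_array_mod string bp)

-- ===== LEMMAS AND PROOFS =====

-- the condition both Pythons test at index i (shared text of both ports)
def pvCondB (string : String) (bp : List Int) (i : Int) : Bool :=
  PySem.List.pyGetD bp i 0 != 0 &&
    (PySem.Str.pyGet? string (PySem.List.pyGetD bp i 0) == PySem.Str.pyGet? string (i + 1))

-- the common initial array: [0]*len(bp) with cell n-1 set to bp[n-1]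
def pvInitB (string : String) (bp : List Int) : List Int :=
  PySem.List.pySetD (List.replicate bp.length 0) (PySem.Str.len string - 1)
    (PySem.List.pyGetD bp (PySem.Str.len string - 1) 0)

def pvE (string : String) (bp : List Int) (t : Nat) : Int := (pvInitB string bp).getD t 0

-- the common fixed point: the value both programs store at a loop cell j
def pvW (string : String) (bp : List Int) (j : Nat) : Int :=
  if pvCondB string bp (j : Int) then
    if h : (PySem.List.pyGetD bp (j : Int) 0 - 1).toNat < j then
      pvW string bp (PySem.List.pyGetD bp (j : Int) 0 - 1).toNat
    else 0
  else PySem.List.pyGetD bp (j : Int) 0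
termination_by j
decreasing_by exact h

-- A's loop body and A's loop as a fold over Nat counters
def pvStepI (string : String) (bp : List Int) (bpm : List Int) (i : Int) : List Int :=
  if pvCondB string bp i then
    PySem.List.pySetD bpm i (PySem.List.pyGetD bpm (PySem.List.pyGetD bp i 0 - 1) 0)
  else PySem.List.pySetD bpm i (PySem.List.pyGetD bp i 0)

def pvLoop (string : String) (bp : List Int) (k : Nat) : List Int :=
  (List.range k).foldl (fun bpm (t : Nat) => pvStepI string bp bpm (1 + (t : Int)))
    (PySem.List.pySetD (PySem.List.pySetD (List.replicate bp.length 0) 0 0)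
      (PySem.Str.len string - 1) (PySem.List.pyGetD bp (PySem.Str.len string - 1) 0))

-- B's loop body and B's loop as a fold over Nat counters
def pvStepB (string : String) (bp : List Int) (res : List Int) (i : Int) : List Int :=
  PySem.List.pySetD res i (PySem.List.pyGetD bp (pvChase string bp (i.toNat + 1) i) 0)

def pvLoopB (string : String) (bp : List Int) (k : Nat) : List Int :=
  (List.range k).foldl (fun res (t : Nat) => pvStepB string bp res (1 + (t : Int)))
    (pvInitB string bp)

lemma pv_chase_succ (string : String) (bp : List Int) (f : Nat) (j : Int) :
    pvChase string bp (f + 1) j =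
      if pvCondB string bp j then pvChase string bp f (PySem.List.pyGetD bp j 0 - 1) else j := rfl

lemma pv_set00 (m : Nat) : (List.replicate m (0:Int)).set 0 0 = List.replicate m 0 := by
  cases m <;> simp [List.replicate_succ]

lemma pv_getD_set (xs : List Int) (i t : Nat) (v : Int) (hi : i < xs.length) :
    (xs.set i v).getD t 0 = if t = i then v else xs.getD t 0 := by
  simp only [List.getD_eq_getElem?_getD, List.getElem?_set]
  by_cases h : t = i
  · subst h; simp [hi]
  · rw [if_neg (Ne.symm h), if_neg h]

lemma pv_loop_zero (string : String) (bp : List Int) :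
    pvLoop string bp 0 = pvInitB string bp := by
  have h00 : PySem.List.pySetD (List.replicate bp.length (0:Int)) 0 0
      = List.replicate bp.length 0 := by
    rw [show ((0:Int) = ((0:Nat) : Int)) from rfl, PySem.List.pySetD_natCast]
    exact pv_set00 bp.length
  rw [pvLoop, List.range_zero, List.foldl_nil, h00, pvInitB]

lemma pv_cond_elim (string : String) (bp : List Int) (i : Int) (h : pvCondB string bp i = true) :
    PySem.List.pyGetD bp i 0 ≠ 0 ∧
    PySem.Str.pyGet? string (PySem.List.pyGetD bp i 0) = PySem.Str.pyGet? string (i + 1) := by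
  simpa [pvCondB, Bool.and_eq_true, bne_iff_ne, beq_iff_eq] using h

lemma pv_getD_nonneg (xs : List Int) (x : Int) (h1 : 0 ≤ x) (h2 : x < (xs.length : Int)) :
    PySem.List.pyGetD xs x 0 = xs.getD x.toNat 0 := by
  rw [PySem.List.pyGetD_eq_getElem xs 0 h1 h2, List.getD_eq_getElem _ _ (by omega)]

-- from Pre_: a matching link at a loop cell points strictly backwards (1 ≤ bp[i] ≤ i)
lemma pv_true_bounds (string : String) (bp : List Int)
    (hPre : Pre_prefix_border_array_mod string bp) (i : Nat)
    (hi1 : 1 ≤ i) (hi2 : i ≤ string.toList.length - 2)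
    (hc : pvCondB string bp (i : Int) = true) :
    1 ≤ bp.getD i 0 ∧ bp.getD i 0 ≤ (i : Int) := by
  obtain ⟨hm, hnm, hall, h0⟩ := hPre
  have h := hall i (List.mem_range.mpr (by omega)) hi1 hi2
  have hc' := pv_cond_elim string bp i hc
  rw [PySem.List.pyGetD_natCast] at hc'
  rcases h with h0' | ⟨hl, hu, hd⟩
  · exact absurd h0' hc'.1
  · rcases hd with hd | hd
    · exact absurd hc'.2 hd
    · exact hd

-- from Pre_: if some loop cell carries the matching link bp[j] = 1 then bp[0] = 0
lemma pv_zero (string : String) (bp : List Int)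
    (hPre : Pre_prefix_border_array_mod string bp) (j : Nat)
    (hj1 : 1 ≤ j) (hj2 : j ≤ string.toList.length - 2)
    (h1 : bp.getD j 0 = 1)
    (h2 : PySem.Str.pyGet? string 1 = PySem.Str.pyGet? string ((j : Int) + 1)) :
    bp.getD 0 0 = 0 := by
  rcases hPre.2.2.2 with h | h
  · exact h
  · exact absurd ⟨h1, h2⟩ (h j (List.mem_range.mpr (by omega)) hj1 hj2)

lemma pv_W_zero (string : String) (bp : List Int) (h0 : bp.getD 0 0 = 0) :
    pvW string bp 0 = 0 := by
  have hg : PySem.List.pyGetD bp ((0 : Nat) : Int) 0 = 0 := by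
    rw [PySem.List.pyGetD_natCast]; exact h0
  have hc : pvCondB string bp ((0 : Nat) : Int) = false := by
    simp only [pvCondB]; rw [hg]; simp
  rw [pvW, hc]
  rw [if_neg (by simp)]
  exact hg

lemma pv_E_zero (string : String) (bp : List Int)
    (hn : 3 ≤ string.toList.length) (hnm : string.toList.length ≤ bp.length) :
    pvE string bp 0 = 0 := by
  rw [pvE, pvInitB, PySem.Str.len_eq]
  rw [PySem.List.pySetD_of_nonneg _ _ (by omega : (0:Int) ≤ (string.toList.length : Int) - 1)]
  rw [pv_getD_set _ _ _ _ (by rw [List.length_replicate]; omega)]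
  rw [if_neg (by omega)]
  rw [List.getD_eq_getElem _ _ (by rw [List.length_replicate]; omega)]
  simp

-- under Pre_, a chase that reaches cell 0 stops there with value 0
lemma pv_chase_zero (string : String) (bp : List Int) (h0 : bp.getD 0 0 = 0) (f : Nat) :
    PySem.List.pyGetD bp (pvChase string bp f 0) 0 = 0 := by
  have hg : PySem.List.pyGetD bp (0 : Int) 0 = 0 := by
    rw [PySem.List.pyGetD_ofNat']; exact h0
  cases f with
  | zero => simpa [pvChase] using hg
  | succ f =>
    rw [pv_chase_succ]
    have hc : pvCondB string bp 0 = false := by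
      simp only [pvCondB]; rw [hg]; simp
    rw [hc]
    rw [if_neg (by simp)]
    exact hg

-- the chase computes pvW at every loop cell
lemma pv_chase_eq (string : String) (bp : List Int)
    (hPre : Pre_prefix_border_array_mod string bp) :
    ∀ j : Nat, 1 ≤ j → j ≤ string.toList.length - 2 → ∀ f : Nat, j < f →
      PySem.List.pyGetD bp (pvChase string bp f (j : Int)) 0 = pvW string bp j := by
  intro j
  induction j using Nat.strong_induction_on with
  | _ j ih =>
    intro hj1 hj2 f hf
    obtain ⟨f, rfl⟩ : ∃ f', f = f' + 1 := ⟨f - 1, by omega⟩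
    rw [pv_chase_succ]
    by_cases hc : pvCondB string bp (j : Int) = true
    · rw [if_pos hc]
      have hb := pv_true_bounds string bp hPre j hj1 hj2 hc
      rw [PySem.List.pyGetD_natCast]
      set r : Nat := (bp.getD j 0 - 1).toNat with hrdef
      have hr : bp.getD j 0 - 1 = ((r : Nat) : Int) := by omega
      rw [hr]
      rw [pvW, if_pos hc, PySem.List.pyGetD_natCast, hr]
      rw [dif_pos (by omega : (((r : Nat) : Int)).toNat < j)]
      rw [show (((r : Nat) : Int)).toNat = r from by omega]
      by_cases hr1 : 1 ≤ r
      · exact ih r (by omega) hr1 (by omega) f (by omega)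
      · have hr0 : r = 0 := by omega
        have hbp1 : bp.getD j 0 = 1 := by omega
        have hchars := (pv_cond_elim string bp j hc).2
        rw [PySem.List.pyGetD_natCast, hbp1] at hchars
        have h0 := pv_zero string bp hPre j hj1 hj2 hbp1 hchars
        rw [hr0, Nat.cast_zero]
        rw [pv_chase_zero string bp h0 f, pv_W_zero string bp h0]
    · rw [if_neg hc, pvW, if_neg hc]

-- A's loop invariant: after k iterations cell t holds pvW t on 1..k and the initial value elsewhere
lemma pv_invariant (string : String) (bp : List Int)
    (hPre : Pre_prefix_border_array_mod string bp) :
    ∀ k, k ≤ string.toList.length - 2 →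
      (pvLoop string bp k).length = bp.length ∧
      ∀ t, t < bp.length → (pvLoop string bp k).getD t 0 =
        if 1 ≤ t ∧ t ≤ k then pvW string bp t else pvE string bp t := by
  have hm := hPre.1
  have hnm := hPre.2.1
  intro k
  induction k with
  | zero =>
    intro _
    refine ⟨by rw [pv_loop_zero]; simp [pvInitB], ?_⟩
    intro t ht
    rw [pv_loop_zero, if_neg (by omega)]
    rfl
  | succ k ih =>
    intro hk
    obtain ⟨ihlen, ihget⟩ := ih (by omega)
    have hn3 : 3 ≤ string.toList.length := by omega
    have hstep : pvLoop string bp (k+1) = pvStepI string bp (pvLoop string bp k) ((1+k : Nat) : Int) := by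
      rw [pvLoop, List.range_succ, List.foldl_append, List.foldl_cons, List.foldl_nil]
      rw [show (1 + (k:Int)) = ((1+k : Nat) : Int) by push_cast; ring]
      rfl
    have hi : 1 + k < bp.length := by omega
    constructor
    · rw [hstep]; unfold pvStepI; split_ifs <;> simp [PySem.List.length_pySetD, ihlen]
    · intro t ht
      rw [hstep]
      by_cases hcond : pvCondB string bp ((1+k : Nat) : Int) = true
      · rw [pvStepI, if_pos hcond]
        have hb := pv_true_bounds string bp hPre (1+k) (by omega) (by omega) hcond
        rw [PySem.List.pyGetD_natCast (xs := bp)]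
        set r : Nat := (bp.getD (1+k) 0 - 1).toNat with hrdef
        have hr : bp.getD (1+k) 0 - 1 = ((r : Nat) : Int) := by omega
        have hread : PySem.List.pyGetD (pvLoop string bp k) (bp.getD (1+k) 0 - 1) 0
            = (pvLoop string bp k).getD r 0 := by
          rw [pv_getD_nonneg _ _ (by omega) (by rw [ihlen]; omega)]
        rw [hread, ihget r (by omega)]
        rw [PySem.List.pySetD_natCast]
        rw [pv_getD_set _ _ _ _ (by rw [ihlen]; exact hi)]
        by_cases htI : t = 1 + k
        · subst htI
          rw [if_pos rfl]
          conv_rhs => rw [if_pos (show 1 ≤ 1+k ∧ 1+k ≤ k+1 by omega), pvW, if_pos hcond]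
          rw [PySem.List.pyGetD_natCast (xs := bp), hr]
          rw [dif_pos (by omega : (((r : Nat) : Int)).toNat < 1 + k)]
          rw [show (((r : Nat) : Int)).toNat = r from by omega]
          by_cases hr1 : 1 ≤ r
          · rw [if_pos (by omega : 1 ≤ r ∧ r ≤ k)]
          · have hr0 : r = 0 := by omega
            have hbp1 : bp.getD (1+k) 0 = 1 := by omega
            have hchars := (pv_cond_elim string bp ((1+k : Nat) : Int) hcond).2
            rw [PySem.List.pyGetD_natCast, hbp1] at hchars
            have h0 := pv_zero string bp hPre (1+k) (by omega) (by omega) hbp1 hchars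
            rw [if_neg (by omega), hr0]
            rw [pv_E_zero string bp hn3 hnm, pv_W_zero string bp h0]
        · rw [if_neg htI, ihget t ht]
          by_cases htk : 1 ≤ t ∧ t ≤ k
          · rw [if_pos htk, if_pos (by omega)]
          · rw [if_neg htk, if_neg (by omega)]
      · rw [pvStepI, if_neg hcond]
        rw [PySem.List.pySetD_natCast]
        rw [pv_getD_set _ _ _ _ (by rw [ihlen]; exact hi)]
        by_cases htI : t = 1 + k
        · subst htI
          rw [if_pos rfl]
          conv_rhs => rw [if_pos (show 1 ≤ 1+k ∧ 1+k ≤ k+1 by omega), pvW, if_neg hcond]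
        · rw [if_neg htI, ihget t ht]
          by_cases htk : 1 ≤ t ∧ t ≤ k
          · rw [if_pos htk, if_pos (by omega)]
          · rw [if_neg htk, if_neg (by omega)]

-- B's loop invariant: same description (its stored value is the chase, i.e. pvW)
lemma pv_invariantB (string : String) (bp : List Int)
    (hPre : Pre_prefix_border_array_mod string bp) :
    ∀ k, k ≤ string.toList.length - 2 →
      (pvLoopB string bp k).length = bp.length ∧
      ∀ t, t < bp.length → (pvLoopB string bp k).getD t 0 =
        if 1 ≤ t ∧ t ≤ k then pvW string bp t else pvE string bp t := by
  have hm := hPre.1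
  have hnm := hPre.2.1
  intro k
  induction k with
  | zero =>
    intro _
    refine ⟨by rw [pvLoopB]; simp [pvInitB], ?_⟩
    intro t ht
    rw [pvLoopB]
    simp only [List.range_zero, List.foldl_nil]
    rw [if_neg (by omega)]
    rfl
  | succ k ih =>
    intro hk
    obtain ⟨ihlen, ihget⟩ := ih (by omega)
    have hstep : pvLoopB string bp (k+1) = pvStepB string bp (pvLoopB string bp k) ((1+k : Nat) : Int) := by
      rw [pvLoopB, List.range_succ, List.foldl_append, List.foldl_cons, List.foldl_nil]
      rw [show (1 + (k:Int)) = ((1+k : Nat) : Int) by push_cast; ring]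
      rfl
    have hi : 1 + k < bp.length := by omega
    constructor
    · rw [hstep]; unfold pvStepB; simp [PySem.List.length_pySetD, ihlen]
    · intro t ht
      rw [hstep, pvStepB]
      have hch : PySem.List.pyGetD bp (pvChase string bp ((((1+k : Nat) : Int)).toNat + 1) ((1+k : Nat) : Int)) 0
          = pvW string bp (1+k) := by
        rw [show (((1+k : Nat) : Int)).toNat + 1 = k + 2 from by omega]
        exact pv_chase_eq string bp hPre (1+k) (by omega) (by omega) (k+2) (by omega)
      rw [hch, PySem.List.pySetD_natCast]
      rw [pv_getD_set _ _ _ _ (by rw [ihlen]; exact hi)]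
      by_cases htI : t = 1 + k
      · subst htI
        rw [if_pos rfl, if_pos (by omega)]
      · rw [if_neg htI, ihget t ht]
        by_cases htk : 1 ≤ t ∧ t ≤ k
        · rw [if_pos htk, if_pos (by omega)]
        · rw [if_neg htk, if_neg (by omega)]

lemma pv_portA_eq (string : String) (bp : List Int) :
    prefix_border_array_mod string bp = pvLoop string bp (string.toList.length - 2) := by
  have hc2 : ((PySem.Str.len string - 1) - 1).toNat = string.toList.length - 2 := by
    rw [PySem.Str.len_eq]; omega
  simp only [prefix_border_array_mod]
  rw [PySem.List.pyRange_one, hc2, List.foldl_map, pvLoop]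
  rfl

lemma pv_portB_eq (string : String) (bp : List Int) :
    prefix_border_array_mod_alt string bp = pvLoopB string bp (string.toList.length - 2) := by
  have hc2 : ((PySem.Str.len string - 1) - 1).toNat = string.toList.length - 2 := by
    rw [PySem.Str.len_eq]; omega
  simp only [prefix_border_array_mod_alt]
  rw [PySem.List.pyRange_one, hc2, List.foldl_map, pvLoopB, pvInitB]
  rfl

-- ===== VERDICT (by name: the statement is the Claim_ definition above) =====
theorem prefix_border_array_mod_spec : Claim_equal_prefix_border_array_mod := by
  intro string bp _ hPre
  show _ = _
  rw [pv_portA_eq, pv_portB_eq]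
  obtain ⟨lenA, getA⟩ := pv_invariant string bp hPre (string.toList.length - 2) le_rfl
  obtain ⟨lenB, getB⟩ := pv_invariantB string bp hPre (string.toList.length - 2) le_rfl
  apply List.ext_getElem (by rw [lenA, lenB])
  intro i h1 h2
  have hiL : i < bp.length := by rw [lenA] at h1; exact h1
  have e1 : (pvLoop string bp (string.toList.length - 2))[i] =
      (pvLoop string bp (string.toList.length - 2)).getD i 0 := by
    rw [List.getD_eq_getElem _ _ (by rw [lenA]; exact hiL)]
  have e2 : (pvLoopB string bp (string.toList.length - 2))[i] =
      (pvLoopB string bp (string.toList.length - 2)).getD i 0 := by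
    rw [List.getD_eq_getElem _ _ (by rw [lenB]; exact hiL)]
  rw [e1, e2, getA i hiL, getB i hiL]
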